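-- pv_equiv track=rewrite | github.com/FG-AI4H-TG-Symptom/fgai4h-tg-symptom-assessment-mmvb-backend | mmvb_backend/toy_ais/implementations/utils.py | sort_array_by_another_array
-- ===== SOURCE A (Python) =====
-- def sort_array_by_another_array(values, map_for_ordering, reverse=False):
--     """Sorts a list based on values from another list"""
--     return [
--         element
--         for _, element in sorted(
--             zip(map_for_ordering, values),
--             key=lambda pair: pair[0],
--             reverse=reverse,
--         )
--     ]
-- ===== SOURCE B (Python) =====
-- def sort_array_by_another_array(values, map_for_ordering, reverse=False):
--     """Sorts a list based on values from another list (bucket grouping: only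
--     distinct keys are sorted; equal-key values stay in original order)."""
--     buckets = {}
--     for key, value in zip(map_for_ordering, values):
--         buckets.setdefault(key, []).append(value)
--     result = []
--     for key in sorted(buckets, reverse=reverse):
--         result.extend(buckets[key])
--     return result
-- ===== Notes on version B (the rewrite author's own statement) =====
-- stated objective: alternative
-- what changed: B replaces A's stable sort of zipped (key, value) pairs by a group-by: it buckets values per distinct key in a dict, sorts only the distinct keys, and concatenates the buckets in that key order.
import Mathlib
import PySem

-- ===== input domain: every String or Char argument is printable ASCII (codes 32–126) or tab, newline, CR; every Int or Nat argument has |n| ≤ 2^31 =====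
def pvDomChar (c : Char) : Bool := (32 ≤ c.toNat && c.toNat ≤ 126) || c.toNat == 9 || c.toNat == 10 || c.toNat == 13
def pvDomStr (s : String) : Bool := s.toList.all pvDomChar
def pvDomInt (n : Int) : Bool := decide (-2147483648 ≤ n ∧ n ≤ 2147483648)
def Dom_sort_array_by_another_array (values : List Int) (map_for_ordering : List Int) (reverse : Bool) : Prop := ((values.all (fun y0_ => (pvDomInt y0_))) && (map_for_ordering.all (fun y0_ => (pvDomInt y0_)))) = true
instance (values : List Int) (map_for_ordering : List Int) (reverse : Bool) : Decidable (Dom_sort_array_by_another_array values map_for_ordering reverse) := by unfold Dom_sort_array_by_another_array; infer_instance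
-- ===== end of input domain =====

-- B replaces A's stable sort of zipped (key, value) pairs by a group-by: bucket values per distinct key in a dict, sort only the distinct keys, concatenate the buckets; objective: alternative algorithm, same observable result.


-- ===== PORT A =====
-- sorted(zip(map_for_ordering, values), key=lambda pair: pair[0], reverse=reverse), then take each pair's second component
def sort_array_by_another_array (values : List Int) (map_for_ordering : List Int) (reverse : Bool) : List Int :=
  (PySem.List.sorted (map_for_ordering.zip values) (fun pair => pair.1) reverse).map (fun p => p.2)

-- ===== PORT B =====
-- buckets = {}; for key, value in zip(...): buckets.setdefault(key, []).append(value)  — ported as Dict.modify with default []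
-- result = []; for key in sorted(buckets, reverse=reverse): result.extend(buckets[key]); return result
-- (buckets[key] inside the loop is ported as getD _ []: every key iterated is a key of the dict, so getD equals Python's exact lookup here)
def sort_array_by_another_array_alt (values : List Int) (map_for_ordering : List Int) (reverse : Bool) : List Int :=
  let buckets := (map_for_ordering.zip values).foldl
      (fun d p => d.modify p.1 [] (fun l => l ++ [p.2])) PySem.Dict.empty
  let skeys := PySem.List.sorted buckets.keys (fun k => k) reverse
  skeys.foldl (fun acc k => acc ++ buckets.getD k []) []

-- ===== PRECONDITION & SPEC =====
def Spec_sort_array_by_another_array (values : List Int) (map_for_ordering : List Int) (reverse : Bool) (out : List Int) : Prop := out = sort_array_by_another_array_alt values map_for_ordering reverse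
instance (values : List Int) (map_for_ordering : List Int) (reverse : Bool) (out : List Int) : Decidable (Spec_sort_array_by_another_array values map_for_ordering reverse out) := by unfold Spec_sort_array_by_another_array; infer_instance

-- ===== CLAIM (what is proved, stated in full; the proofs are below) =====
def Claim_equal_sort_array_by_another_array : Prop := ∀ (values : List Int) (map_for_ordering : List Int) (reverse : Bool), Dom_sort_array_by_another_array values map_for_ordering reverse → Spec_sort_array_by_another_array values map_for_ordering reverse (sort_array_by_another_array values map_for_ordering reverse)

-- ===== LEMMAS AND PROOFS =====

-- the strict comparison PySem's stable insertion sort uses, as a function of the reverse flag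
def pvBef (rev : Bool) (a b : Int) : Bool := if rev then decide (b < a) else decide (a < b)

theorem pvBef_trans (rev : Bool) (a b c : Int) (h1 : pvBef rev a b = true) (h2 : pvBef rev b c = true) :
    pvBef rev a c = true := by
  cases rev <;> simp [pvBef] at * <;> omega

theorem pvBef_asym (rev : Bool) (a b : Int) (h : pvBef rev a b = true) : pvBef rev b a = false := by
  cases rev <;> simp [pvBef] at * <;> omega

theorem pvBef_irrefl (rev : Bool) (a : Int) : pvBef rev a a = false := by
  cases rev <;> simp [pvBef]

-- insertBy walks past a block whose elements all compare false
theorem pv_insertBy_skip {α : Type} (before : α → α → Bool) (x : α) (l r : List α)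
    (h : ∀ y ∈ l, before x y = false) :
    PySem.List.insertBy before x (l ++ r) = l ++ PySem.List.insertBy before x r := by
  induction l with
  | nil => rfl
  | cons y t ih =>
      simp only [List.cons_append, PySem.List.insertBy, h y (by simp)]
      simp only [Bool.false_eq_true, reduceIte, List.cons.injEq, true_and]
      exact ih (fun z hz => h z (by simp [hz]))

-- insertBy stops immediately when every element compares true
theorem pv_insertBy_front {α : Type} (before : α → α → Bool) (x : α) (l : List α)
    (h : ∀ y ∈ l, before x y = true) :
    PySem.List.insertBy before x l = x :: l := by
  cases l with
  | nil => rfl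
  | cons y t => simp [PySem.List.insertBy, h y (by simp)]

-- insertBy splits the list at the first element that compares true
theorem pv_insertBy_eq_takeWhile {α : Type} (before : α → α → Bool) (x : α) (l : List α) :
    PySem.List.insertBy before x l
      = l.takeWhile (fun y => !(before x y)) ++ x :: l.dropWhile (fun y => !(before x y)) := by
  induction l with
  | nil => rfl
  | cons y t ih =>
      by_cases h : before x y = true
      · simp [PySem.List.insertBy, h]
      · simp only [Bool.not_eq_true] at h
        simp [PySem.List.insertBy, h, ih]

-- in a pvBef-increasing list, everything from the first element the comparison accepts is accepted
theorem pv_dropWhile_all (rev : Bool) (k0 : Int) (S : List Int)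
    (hS : S.Pairwise (fun a b => pvBef rev a b = true)) :
    ∀ k ∈ S.dropWhile (fun y => !(pvBef rev k0 y)), pvBef rev k0 k = true := by
  induction S with
  | nil => simp
  | cons y t ih =>
      rw [List.pairwise_cons] at hS
      by_cases h : pvBef rev k0 y = true
      · intro k hk
        rw [List.dropWhile_cons_of_neg (by simp [h])] at hk
        rcases List.mem_cons.mp hk with rfl | hk
        · exact h
        · exact pvBef_trans rev k0 y k h (hS.1 k hk)
      · intro k hk
        rw [List.dropWhile_cons_of_pos (by simp [Bool.not_eq_true] at h ⊢; exact h)] at hk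
        exact ih hS.2 k hk

-- the sorted key list is strictly pvBef-increasing (keys are distinct)
theorem pv_sorted_keys_pairwise (rev : Bool) (ks : List Int) :
    (PySem.List.sorted (PySem.Set.ofList ks) (fun k => k) rev).Pairwise
      (fun a b => pvBef rev a b = true) := by
  cases rev
  · exact (PySem.List.sorted_ofList_pairwise_lt ks).imp (by intro a b h; simp [pvBef]; omega)
  · have hge := PySem.List.sorted_pairwise_rev (PySem.Set.ofList ks) (fun k => k)
    have hnd : (PySem.List.sorted (PySem.Set.ofList ks) (fun k => k) true).Nodup :=
      (PySem.List.sorted_perm (PySem.Set.ofList ks) (fun k => k) true).nodup_iff.mpr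
        (by rw [← PySem.List.dedup_eq_ofList]; exact PySem.List.nodup_dedup ks)
    exact (hge.and hnd).imp (by intro a b ⟨h1, h2⟩; simp [pvBef]; omega)

-- appending one element to the input appends one stable-insert step
theorem pv_sorted_append_singleton {α : Type} (xs : List α) (p : α) (key : α → Int) (rev : Bool) :
    PySem.List.sorted (xs ++ [p]) key rev
      = PySem.List.insertBy (fun a b => pvBef rev (key a) (key b)) p (PySem.List.sorted xs key rev) := by
  cases rev
  · rw [PySem.List.sorted_eq_foldl_insertBy, PySem.List.sorted_eq_foldl_insertBy, List.foldl_append]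
    rfl
  · rw [PySem.List.sorted_rev_eq_foldl_insertBy, PySem.List.sorted_rev_eq_foldl_insertBy,
        List.foldl_append]
    rfl

-- Set.ofList with one element appended
theorem pv_ofList_append_singleton (l : List Int) (a : Int) :
    PySem.Set.ofList (l ++ [a])
      = if a ∈ l then PySem.Set.ofList l else PySem.Set.ofList l ++ [a] := by
  rw [PySem.Set.ofList_eq_foldl, List.foldl_append, ← PySem.Set.ofList_eq_foldl]
  simp [PySem.Set.add, PySem.Set.contains, PySem.Set.mem_ofList]

-- members of a per-key group carry that key
theorem pv_mem_group (xs : List (Int × Int)) (k : Int) (y : Int × Int)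
    (h : y ∈ xs.filter (fun q => q.1 == k)) : y.1 = k := by
  simp only [List.mem_filter, beq_iff_eq] at h; exact h.2

-- MAIN: a stable sort of pairs by first component is the concatenation, over the sorted
-- distinct keys, of the per-key groups in original order
theorem pv_sorted_fst_flatMap (rev : Bool) (xs : List (Int × Int)) :
    PySem.List.sorted xs (fun pair => pair.1) rev
      = (PySem.List.sorted (PySem.Set.ofList (xs.map (fun p => p.1))) (fun k => k) rev).flatMap
          (fun k => xs.filter (fun p => p.1 == k)) := by
  induction xs using List.reverseRecOn with
  | nil => rfl
  | append_singleton xs p ih =>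
    have hgrp : ∀ k, (xs ++ [p]).filter (fun q => q.1 == k)
        = xs.filter (fun q => q.1 == k) ++ (if p.1 = k then [p] else []) := by
      intro k; rw [List.filter_append]; by_cases h : p.1 = k <;> simp [h]
    have hS := pv_sorted_keys_pairwise rev (xs.map (fun q => q.1))
    have hgr : ∀ (L : List Int),
        (∀ k ∈ L, k ≠ p.1) →
        L.flatMap (fun k => (xs ++ [p]).filter (fun q => q.1 == k))
          = L.flatMap (fun k => xs.filter (fun q => q.1 == k)) := by
      intro L hL
      refine List.flatMap_congr ?_
      intro k hk; rw [hgrp k, if_neg (fun h => hL k hk h.symm)]; simp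
    rw [pv_sorted_append_singleton xs p (fun pair => pair.1) rev, ih,
        List.map_append, List.map_singleton, pv_ofList_append_singleton]
    by_cases hmem : p.1 ∈ xs.map (fun q => q.1)
    · -- the key already occurs: p joins the end of its existing group
      simp only [hmem, if_true]
      have hmemS : p.1 ∈ PySem.List.sorted (PySem.Set.ofList (xs.map (fun q => q.1))) (fun k => k) rev := by
        rw [PySem.List.mem_sorted, PySem.Set.mem_ofList]; exact hmem
      obtain ⟨A, B, hAB⟩ := List.append_of_mem hmemS
      rw [hAB] at hS ⊢
      rw [List.pairwise_append] at hS
      have hA : ∀ a ∈ A, pvBef rev p.1 a = false := fun a ha =>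
        pvBef_asym rev a p.1 (hS.2.2 a ha p.1 (by simp))
      have hB : ∀ b ∈ B, pvBef rev p.1 b = true := (List.pairwise_cons.mp hS.2.1).1
      have hAne : ∀ a ∈ A, a ≠ p.1 := by
        intro a ha h
        exact absurd (h ▸ hS.2.2 a ha p.1 (by simp)) (by simp [pvBef_irrefl])
      have hBne : ∀ b ∈ B, b ≠ p.1 := by
        intro b hb h
        exact absurd (h ▸ hB b hb) (by simp [pvBef_irrefl])
      rw [List.flatMap_append, List.flatMap_cons, ← List.append_assoc,
          pv_insertBy_skip _ p _ _ (by
            intro y hy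
            rcases List.mem_append.mp hy with hy | hy
            · obtain ⟨k, hk, hyk⟩ := List.mem_flatMap.mp hy
              rw [pv_mem_group xs k y hyk]; exact hA k hk
            · rw [pv_mem_group xs p.1 y hy]
              exact pvBef_irrefl rev p.1),
          pv_insertBy_front _ p _ (by
            intro y hy
            obtain ⟨k, hk, hyk⟩ := List.mem_flatMap.mp hy
            rw [pv_mem_group xs k y hyk]; exact hB k hk)]
      rw [List.flatMap_append, List.flatMap_cons, hgr A hAne, hgr B hBne,
          hgrp p.1, if_pos rfl]
      simp
    · -- a new key: p forms a fresh singleton group at its sorted position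
      simp only [hmem, if_false]
      have hnil : xs.filter (fun q => q.1 == p.1) = [] := by
        rw [List.filter_eq_nil_iff]
        intro q hq
        simp only [beq_iff_eq]
        exact fun h => hmem (List.mem_map.mpr ⟨q, hq, h⟩)
      have hne : ∀ k ∈ PySem.List.sorted (PySem.Set.ofList (xs.map (fun q => q.1))) (fun k => k) rev,
          k ≠ p.1 := by
        intro k hk h
        rw [PySem.List.mem_sorted, PySem.Set.mem_ofList] at hk
        exact hmem (h ▸ hk)
      conv_lhs => rw [← List.takeWhile_append_dropWhile
        (p := fun y => !(pvBef rev p.1 y))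
        (l := PySem.List.sorted (PySem.Set.ofList (xs.map (fun q => q.1))) (fun k => k) rev)]
      rw [List.flatMap_append,
          pv_insertBy_skip _ p _ _ (by
            intro y hy
            obtain ⟨k, hk, hyk⟩ := List.mem_flatMap.mp hy
            have := List.mem_takeWhile_imp hk
            rw [pv_mem_group xs k y hyk]; simpa using this),
          pv_insertBy_front _ p _ (by
            intro y hy
            obtain ⟨k, hk, hyk⟩ := List.mem_flatMap.mp hy
            rw [pv_mem_group xs k y hyk]
            exact pv_dropWhile_all rev p.1 _ hS k hk)]
      rw [pv_sorted_append_singleton _ p.1 (fun k => k) rev, pv_insertBy_eq_takeWhile,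
          List.flatMap_append, List.flatMap_cons,
          hgr _ (fun k hk => hne k ((List.takeWhile_sublist _).subset hk)),
          hgr _ (fun k hk => hne k ((List.dropWhile_sublist _).subset hk)),
          hgrp p.1, if_pos rfl, hnil]
      simp

-- ===== VERDICT (by name: the statement is the Claim_ definition above) =====
theorem sort_array_by_another_array_spec : Claim_equal_sort_array_by_another_array := by
  intro values m rev _
  have hget : ∀ k : Int,
      (List.foldl (fun d p => d.modify p.1 [] fun l => l ++ [p.2])
        (PySem.Dict.empty : PySem.Dict Int (List Int)) (m.zip values)).getD k []
      = List.map (fun x => x.2) (List.filter (fun p => p.1 == k) (m.zip values)) := by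
    intro k
    rw [PySem.Dict.getD_foldl_modify_append]
    rfl
  have hkeys :
      (List.foldl (fun d p => d.modify p.1 [] fun l => l ++ [p.2])
        (PySem.Dict.empty : PySem.Dict Int (List Int)) (m.zip values)).keys
      = PySem.Set.ofList ((m.zip values).map (fun p => p.1)) := by
    rw [PySem.Dict.keys_foldl_modify_key (m.zip values) (fun p => p.1) []
          (fun _ p => (fun l => l ++ [p.2])) PySem.Dict.empty]
    rw [show (PySem.Dict.empty : PySem.Dict Int (List Int)).keys = [] from rfl,
        PySem.Set.update_nil_left]
  unfold Spec_sort_array_by_another_array sort_array_by_another_array sort_array_by_another_array_alt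
  simp only [hget, hkeys]
  rw [PySem.List.foldl_append_eq_flatMap, pv_sorted_fst_flatMap rev (m.zip values),
    List.map_flatMap]
  rfl
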